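-- pv_equiv track=rewrite | github.com/DragunWF/Competitive-Programming | CodeWars/python/7_kyu/fair_swap_between_two_lists.py | fair_swap
-- ===== SOURCE A (Python) =====
-- def fair_swap(list1: list[int], list2: list[int]) -> set:
--     output = set()
--     for first_num in list1:
--         for second_num in list2:
--             first_sum = sum(list1) - first_num + second_num
--             second_sum = sum(list2) - second_num + first_num
--             if first_sum == second_sum:
--                 output.add((first_num, second_num))
--     return output
-- ===== SOURCE B (Python) =====
-- def fair_swap(list1: list[int], list2: list[int]) -> set:
--     # O(n+m): a swap (a, b) equalizes the sums iff b = a + (sum2-sum1)/2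
--     diff = sum(list2) - sum(list1)
--     if diff % 2 != 0:
--         return set()
--     half = diff // 2
--     targets = set(list2)
--     output = set()
--     for a in list1:
--         if a + half in targets:
--             output.add((a, a + half))
--     return output
-- ===== Notes on version B (the rewrite author's own statement) =====
-- stated objective: faster
-- what changed: Replaces the O(n*m) nested scan (with sums recomputed inside the inner loop) by a closed-form condition: precompute the sums once, derive the unique required partner b = a + (sum2-sum1)/2, and check it against a hash set of list2 in one pass over list1.
import Mathlib
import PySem

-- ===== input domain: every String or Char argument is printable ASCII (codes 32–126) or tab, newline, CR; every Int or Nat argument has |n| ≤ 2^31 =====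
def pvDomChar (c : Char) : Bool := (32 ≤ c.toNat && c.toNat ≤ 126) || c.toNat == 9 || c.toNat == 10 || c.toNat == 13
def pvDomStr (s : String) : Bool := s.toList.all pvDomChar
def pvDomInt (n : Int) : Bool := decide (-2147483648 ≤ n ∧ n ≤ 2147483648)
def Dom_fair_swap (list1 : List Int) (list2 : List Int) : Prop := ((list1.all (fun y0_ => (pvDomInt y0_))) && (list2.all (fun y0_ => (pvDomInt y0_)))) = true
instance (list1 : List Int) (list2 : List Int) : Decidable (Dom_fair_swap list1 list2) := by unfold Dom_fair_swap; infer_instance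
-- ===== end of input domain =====

-- B replaces A's nested O(n*m) scan by a closed-form partner check (b = a + (S2-S1)/2) against a set of list2: asymptotically faster.


-- ===== PORT A =====
def fair_swap (list1 : List Int) (list2 : List Int) : List (Int × Int) :=
  list1.foldl (fun output first_num =>
    list2.foldl (fun output second_num =>
      if list1.sum - first_num + second_num = list2.sum - second_num + first_num
      then PySem.Set.add output (first_num, second_num)
      else output) output) PySem.Set.empty

-- ===== PORT B =====
def fair_swap_alt (list1 : List Int) (list2 : List Int) : List (Int × Int) :=
  let diff := list2.sum - list1.sum
  if PySem.Int.mod diff 2 ≠ 0 then PySem.Set.empty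
  else
    let half := PySem.Int.floordiv diff 2
    let targets := PySem.Set.ofList list2
    list1.foldl (fun output a =>
      if targets.contains (a + half)
      then PySem.Set.add output (a, a + half)
      else output) PySem.Set.empty

-- ===== PRECONDITION & SPEC =====
def Spec_fair_swap (list1 : List Int) (list2 : List Int) (out : List (Int × Int)) : Prop := out = fair_swap_alt list1 list2
instance (list1 : List Int) (list2 : List Int) (out : List (Int × Int)) : Decidable (Spec_fair_swap list1 list2 out) := by unfold Spec_fair_swap; infer_instance

-- ===== CLAIM (what is proved, stated in full; the proofs are below) =====
def Claim_equal_fair_swap : Prop := ∀ (list1 : List Int) (list2 : List Int), Dom_fair_swap list1 list2 → Spec_fair_swap list1 list2 (fair_swap list1 list2)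

-- ===== LEMMAS AND PROOFS =====

theorem pv_add_of_mem {s : PySem.Set (Int × Int)} {x : Int × Int} (h : x ∈ s) :
    PySem.Set.add s x = s := by
  simp [PySem.Set.add, h]

-- A's inner loop, when 2 ∣ diff: adds (a, a+half) iff a+half ∈ list2
theorem pv_inner_even (S1 S2 h : Int) (hd : S2 - S1 = 2 * h) (a : Int)
    (list2 : List Int) (out : PySem.Set (Int × Int)) :
    list2.foldl (fun output second_num =>
      if S1 - a + second_num = S2 - second_num + a
      then PySem.Set.add output (a, second_num)
      else output) out
    = if (a + h) ∈ list2 then PySem.Set.add out (a, a + h) else out := by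
  induction list2 generalizing out with
  | nil => simp
  | cons b rest ih =>
    simp only [List.foldl_cons, List.mem_cons]
    by_cases hb : b = a + h
    · subst hb
      have hc : S1 - a + (a + h) = S2 - (a + h) + a := by omega
      simp only [if_pos hc, ih, true_or, if_pos]
      split_ifs with hm
      · exact pv_add_of_mem (by simp [PySem.Set.mem_add])
      · rfl
    · have hc : ¬ (S1 - a + b = S2 - b + a) := by omega
      simp only [if_neg hc, ih]
      have hne : ¬ (a + h = b) := fun e => hb e.symm
      simp [hne]

-- A's inner loop, when ¬ 2 ∣ diff: never adds anything
theorem pv_inner_odd (S1 S2 : Int) (hd : ¬ (2 ∣ S2 - S1)) (a : Int)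
    (list2 : List Int) (out : PySem.Set (Int × Int)) :
    list2.foldl (fun output second_num =>
      if S1 - a + second_num = S2 - second_num + a
      then PySem.Set.add output (a, second_num)
      else output) out = out := by
  induction list2 generalizing out with
  | nil => rfl
  | cons b rest ih =>
    have hc : ¬ (S1 - a + b = S2 - b + a) := by
      intro e; exact hd ⟨b - a, by omega⟩
    simp only [List.foldl_cons, if_neg hc, ih]

theorem fair_swap_eq_alt (list1 list2 : List Int) :
    fair_swap list1 list2 = fair_swap_alt list1 list2 := by
  unfold fair_swap fair_swap_alt
  set diff := list2.sum - list1.sum with hdiff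
  by_cases he : PySem.Int.mod diff 2 = 0
  · -- even case
    have h2 : (2 : Int) ∣ diff := (PySem.Int.mod_eq_zero_iff_dvd diff 2).1 he
    set h := PySem.Int.floordiv diff 2 with hh
    have hdh : diff = 2 * h := by
      have := PySem.Int.floordiv_mul_add_mod diff 2
      rw [he] at this; omega
    rw [if_neg (not_not.2 he)]
    have hstep : ∀ (out : PySem.Set (Int × Int)) (a : Int),
        (list2.foldl (fun output second_num =>
          if list1.sum - a + second_num = list2.sum - second_num + a
          then PySem.Set.add output (a, second_num)
          else output) out)
        = if (PySem.Set.ofList list2).contains (a + h)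
          then PySem.Set.add out (a, a + h) else out := by
      intro out a
      rw [pv_inner_even list1.sum list2.sum h (by omega) a list2 out]
      by_cases hm : (a + h) ∈ list2
      · rw [if_pos hm, if_pos (by simp [hm])]
      · rw [if_neg hm, if_neg (by simp [hm])]
    have hfold : ∀ (l : List Int) (out : PySem.Set (Int × Int)),
        l.foldl (fun output first_num =>
          list2.foldl (fun output second_num =>
            if list1.sum - first_num + second_num = list2.sum - second_num + first_num
            then PySem.Set.add output (first_num, second_num)
            else output) output) out
        = l.foldl (fun output a =>
            if (PySem.Set.ofList list2).contains (a + h)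
            then PySem.Set.add output (a, a + h)
            else output) out := by
      intro l
      induction l with
      | nil => intro out; rfl
      | cons a rest ih =>
        intro out
        simp only [List.foldl_cons]
        rw [hstep out a]
        exact ih _
    exact hfold list1 PySem.Set.empty
  · -- odd case: neither side ever adds
    have hd : ¬ (2 ∣ diff) := fun d => he ((PySem.Int.mod_eq_zero_iff_dvd diff 2).2 d)
    simp only [if_pos he]
    have hall : ∀ (l : List Int) (out : PySem.Set (Int × Int)),
        l.foldl (fun output first_num =>
          list2.foldl (fun output second_num =>
            if list1.sum - first_num + second_num = list2.sum - second_num + first_num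
            then PySem.Set.add output (first_num, second_num)
            else output) output) out = out := by
      intro l
      induction l with
      | nil => intro out; rfl
      | cons a rest ih =>
        intro out
        simp only [List.foldl_cons]
        rw [pv_inner_odd list1.sum list2.sum (by rwa [hdiff] at hd) a list2 out]
        exact ih out
    exact hall list1 PySem.Set.empty

-- ===== VERDICT (by name: the statement is the Claim_ definition above) =====
theorem fair_swap_spec : Claim_equal_fair_swap := by
  intro list1 list2 _
  unfold Spec_fair_swap
  exact fair_swap_eq_alt list1 list2
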